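-- pv_equiv track=rewrite | github.com/agiresearch/OpenAGI | benchmark_tasks/finetune/generate_tree_structure_t5.py | find_last_task
-- ===== SOURCE A (Python) =====
-- def find_last_task(sentence):
--     if sentence.count(6) == 1:
--         last_cand = sentence[1 : sentence.index(6) + 1]
--         if 61 in last_cand:
--             last_cand.remove(61)
--         if 41 in last_cand:
--             last_cand.remove(41)
--         return last_cand
--     indices = [i for i, c in enumerate(sentence) if c == 6]
--     last_cand = sentence[indices[-2] + 1 : indices[-1] + 1 :]
--     if 61 in last_cand:
--         last_cand.remove(61)
--     if 41 in last_cand: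
--         last_cand.remove(41)
--     return last_cand
-- ===== SOURCE B (Python) =====
-- def find_last_task(sentence):
--     # single reverse scan: find the last 6 (end) and the 6 before it (start)
--     start = 1
--     end = None
--     for j in range(len(sentence) - 1, -1, -1):
--         if sentence[j] == 6:
--             if end is None:
--                 end = j
--             else:
--                 start = j + 1
--                 break
--     last_cand = sentence[start:end + 1]
--     if 61 in last_cand:
--         last_cand.remove(61)
--     if 41 in last_cand:
--         last_cand.remove(41)
--     return last_cand
-- ===== Notes on version B (the rewrite author's own statement) =====
-- stated objective: alternative
-- what changed: A makes three forward passes (count, index or an enumerate comprehension, then negative indexing into the index list); B makes a single reverse scan that stops at the second-to-last 6, finding the slice bounds directly.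
-- outside the precondition, e.g. on find_last_task([1, 2, 3]): A raises IndexError, B raises TypeError
import Mathlib
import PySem

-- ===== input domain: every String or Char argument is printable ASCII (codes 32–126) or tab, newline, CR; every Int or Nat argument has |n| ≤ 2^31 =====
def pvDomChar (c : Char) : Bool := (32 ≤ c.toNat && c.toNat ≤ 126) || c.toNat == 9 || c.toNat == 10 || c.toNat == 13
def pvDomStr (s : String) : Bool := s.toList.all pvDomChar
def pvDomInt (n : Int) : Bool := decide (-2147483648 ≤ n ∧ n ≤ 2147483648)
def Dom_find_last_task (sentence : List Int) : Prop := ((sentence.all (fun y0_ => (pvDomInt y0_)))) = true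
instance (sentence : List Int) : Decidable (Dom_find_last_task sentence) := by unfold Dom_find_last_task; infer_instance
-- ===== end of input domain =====

-- B replaces A's three forward passes (count, index/enumerate-comprehension, negative indexing)
-- by one reverse scan that finds the last 6 and the 6 before it; objective: alternative (single pass).


-- ===== PORT A =====
-- shared tail of both Pythons: `if 61 in lc: lc.remove(61); if 41 in lc: lc.remove(41)`
def removeTags (l : List Int) : List Int :=
  let l1 := if (61 : Int) ∈ l then (PySem.List.remove? l 61).getD l else l
  if (41 : Int) ∈ l1 then (PySem.List.remove? l1 41).getD l1 else l1

-- `[i for i, c in enumerate(sentence) if c == 6]`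
def aIndices (sentence : List Int) : List Int :=
  (PySem.List.enumerate sentence 0).filterMap (fun p => if p.2 == 6 then some p.1 else none)

def find_last_task (sentence : List Int) : List Int :=
  if PySem.List.count sentence 6 == 1 then
    -- count == 1 guarantees index? is some; `.getD 0` is unreachable filler
    let i : Int := ((PySem.List.index? sentence 6).getD 0 : Nat)
    removeTags (PySem.List.slice sentence (some 1) (some (i + 1)))
  else
    let indices := aIndices sentence
    match PySem.List.pyGet? indices (-2), PySem.List.pyGet? indices (-1) with
    | some a, some b => removeTags (PySem.List.slice sentence (some (a + 1)) (some (b + 1)))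
    | _, _ => []  -- Python raises IndexError here (no 6 in sentence); outside Pre_

-- ===== PORT B =====
-- reverse scan `for j in range(len(sentence)-1, -1, -1)` with early break; returns (start, end)
def scanRev (sentence : List Int) : Nat → Option Int → Int × Option Int
  | 0, e => (1, e)
  | j + 1, e =>
    if sentence.getD j 0 == 6 then
      match e with
      | none => scanRev sentence j (some (j : Int))
      | some _ => ((j : Int) + 1, e)
    else scanRev sentence j e

def find_last_task_alt (sentence : List Int) : List Int :=
  match scanRev sentence sentence.length none with
  | (start, some e) => removeTags (PySem.List.slice sentence (some start) (some (e + 1)))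
  | (_, none) => []  -- Python raises TypeError here (no 6 in sentence); outside Pre_

-- ===== PRECONDITION & SPEC =====
-- Pre_ excludes sentences with no 6: there A raises IndexError (indices[-2]) and B raises TypeError.
def Pre_find_last_task (sentence : List Int) : Prop := (6 : Int) ∈ sentence
instance (sentence : List Int) : Decidable (Pre_find_last_task sentence) := by
  unfold Pre_find_last_task; infer_instance
def pvWitness_find_last_task : List Int := [1, 6, 2, 6]

def Spec_find_last_task (sentence : List Int) (out : List Int) : Prop := out = find_last_task_alt sentence
instance (sentence : List Int) (out : List Int) : Decidable (Spec_find_last_task sentence out) := by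
  unfold Spec_find_last_task; infer_instance

-- ===== CLAIM (what is proved, stated in full; the proofs are below) =====
def Claim_equal_find_last_task : Prop := ∀ (sentence : List Int), Dom_find_last_task sentence → Pre_find_last_task sentence → Spec_find_last_task sentence (find_last_task sentence)

-- ===== LEMMAS AND PROOFS =====

-- spec shape of B's reverse scan: last index of 6 and (index of previous 6) + 1 (default 1)
def lastTwo (I : List Int) : Int × Option Int :=
  match I.getLast? with
  | none => (1, none)
  | some b => ((match I.dropLast.getLast? with | none => 1 | some a => a + 1), some b)

theorem aIndices_take_succ (s : List Int) (j : Nat) (hj : j < s.length) :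
    aIndices (s.take (j + 1)) =
      aIndices (s.take j) ++ (if s[j] = 6 then [(j : Int)] else []) := by
  have ht : s.take (j + 1) = s.take j ++ [s[j]] := by
    rw [List.take_add_one]; simp [List.getElem?_eq_getElem hj]
  have hl : (s.take j).length = j := by simp [Nat.le_of_lt hj]
  unfold aIndices
  rw [ht, PySem.List.enumerate_append, List.filterMap_append, hl]
  simp only [PySem.List.enumerate_cons, PySem.List.enumerate_nil, List.filterMap_cons,
    List.filterMap_nil, zero_add]
  by_cases h6 : s[j] = 6 <;> simp [h6]

theorem scanRev_some (s : List Int) (j : Nat) (hj : j ≤ s.length) (e : Int) :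
    scanRev s j (some e) =
      ((match (aIndices (s.take j)).getLast? with | none => 1 | some a => a + 1), some e) := by
  induction j with
  | zero => simp [scanRev, aIndices, PySem.List.enumerate_nil]
  | succ j ih =>
    have hj' : j < s.length := hj
    have hg : s.getD j 0 = s[j] := List.getD_eq_getElem s 0 hj'
    by_cases h6 : s[j] = 6
    · have hI : aIndices (s.take (j + 1)) = aIndices (s.take j) ++ [(j : Int)] := by
        rw [aIndices_take_succ s j hj', if_pos h6]
      simp only [scanRev, hg]
      rw [if_pos (by simp [h6]), hI, List.getLast?_concat]
    · have hI : aIndices (s.take (j + 1)) = aIndices (s.take j) := by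
        rw [aIndices_take_succ s j hj', if_neg h6, List.append_nil]
      simp only [scanRev, hg]
      rw [if_neg (by simp [h6]), hI]
      exact ih (Nat.le_of_lt hj)

theorem scanRev_none (s : List Int) (j : Nat) (hj : j ≤ s.length) :
    scanRev s j none = lastTwo (aIndices (s.take j)) := by
  induction j with
  | zero => simp [scanRev, aIndices, PySem.List.enumerate_nil, lastTwo]
  | succ j ih =>
    have hj' : j < s.length := hj
    have hg : s.getD j 0 = s[j] := List.getD_eq_getElem s 0 hj'
    by_cases h6 : s[j] = 6
    · have hI : aIndices (s.take (j + 1)) = aIndices (s.take j) ++ [(j : Int)] := by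
        rw [aIndices_take_succ s j hj', if_pos h6]
      simp only [scanRev, hg]
      rw [if_pos (by simp [h6]), scanRev_some s j (Nat.le_of_lt hj'), hI]
      unfold lastTwo
      rw [List.getLast?_concat, List.dropLast_concat]
    · have hI : aIndices (s.take (j + 1)) = aIndices (s.take j) := by
        rw [aIndices_take_succ s j hj', if_neg h6, List.append_nil]
      simp only [scanRev, hg]
      rw [if_neg (by simp [h6]), hI]
      exact ih (Nat.le_of_lt hj)

theorem filterMap_enum_length (s : List Int) (st : Int) :
    ((PySem.List.enumerate s st).filterMap
      (fun p => if p.2 == 6 then some p.1 else none)).length = PySem.List.count s 6 := by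
  induction s generalizing st with
  | nil => simp [PySem.List.enumerate_nil, PySem.List.count_eq]
  | cons x s ih =>
    rw [PySem.List.enumerate_cons, List.filterMap_cons, PySem.List.count_eq, List.count_cons,
      ← PySem.List.count_eq, ← ih (st + 1)]
    by_cases h6 : x = 6
    · rw [if_pos (by simp [h6]), if_pos (by simp [h6])]
      simp
    · rw [if_neg (by simp [h6]), if_neg (by simp [h6])]
      simp

theorem aIndices_length (s : List Int) : (aIndices s).length = PySem.List.count s 6 := by
  unfold aIndices; exact filterMap_enum_length s 0

theorem aIndices_head? (s : List Int) :
    (aIndices s).head? = (PySem.List.index? s 6).map (fun n => (n : Int)) := by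
  have key : ∀ (l : List Int) (st : Int),
      ((PySem.List.enumerate l st).filterMap
        (fun p => if p.2 == 6 then some p.1 else none)).head? =
      (PySem.List.index? l 6).map (fun n => st + (n : Int)) := by
    intro l
    induction l with
    | nil => intro st; simp [PySem.List.enumerate_nil, PySem.List.index?]
    | cons x l ih =>
      intro st
      by_cases h6 : x = 6
      · subst h6
        rw [PySem.List.index?_cons_self]
        simp [PySem.List.enumerate_cons]
      · rw [PySem.List.index?_cons_of_ne l h6]
        simp only [PySem.List.enumerate_cons, List.filterMap_cons]
        rw [if_neg (by simp [h6]), ih (st + 1)]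
        cases PySem.List.index? l 6 <;> simp <;> ring
  have := key s 0
  unfold aIndices
  rw [this]
  cases PySem.List.index? s 6 <;> simp

-- ===== VERDICT (by name: the statement is the Claim_ definition above) =====
theorem find_last_task_spec : Claim_equal_find_last_task := by
  intro s _ hpre
  unfold Spec_find_last_task find_last_task find_last_task_alt
  have hB : scanRev s s.length none = lastTwo (aIndices s) := by
    simpa [List.take_length] using scanRev_none s s.length le_rfl
  rw [hB]
  have hlen := aIndices_length s
  have hcountpos : 0 < PySem.List.count s 6 := by
    rw [PySem.List.count_eq]; exact List.count_pos_iff.mpr hpre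
  by_cases h1 : PySem.List.count s 6 = 1
  · rw [if_pos (by simpa using h1)]
    have hIlen : (aIndices s).length = 1 := by rw [hlen, h1]
    obtain ⟨a, hIa⟩ := List.length_eq_one_iff.mp hIlen
    cases hidx : PySem.List.index? s 6 with
    | none =>
      rw [PySem.List.index?_eq_none_iff] at hidx
      exact absurd hpre hidx
    | some i0 =>
      have hhead : (aIndices s).head? = some a := by rw [hIa]; rfl
      rw [aIndices_head? s, hidx] at hhead
      have hae : ((i0 : Nat) : Int) = a := by simpa using hhead
      simp [hIa, lastTwo, ← hae]
  · rw [if_neg (by simpa using h1)]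
    have h2 : 2 ≤ (aIndices s).length := by omega
    have hidx1 : PySem.List.pyIdx? (aIndices s).length (-1) = some ((aIndices s).length - 1) := by
      simp [PySem.List.pyIdx?]
      exact List.ne_nil_of_length_pos (by omega)
    have hidx2 : PySem.List.pyIdx? (aIndices s).length (-2) = some ((aIndices s).length - 2) := by
      simp [PySem.List.pyIdx?]; omega
    obtain ⟨b, hb⟩ : ∃ b, (aIndices s)[(aIndices s).length - 1]? = some b :=
      ⟨_, List.getElem?_eq_getElem (by omega)⟩
    obtain ⟨a, ha⟩ : ∃ a, (aIndices s)[(aIndices s).length - 2]? = some a :=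
      ⟨_, List.getElem?_eq_getElem (by omega)⟩
    have hget1 : PySem.List.pyGet? (aIndices s) (-1) = some b := by
      simp [PySem.List.pyGet?, hidx1, hb]
    have hget2 : PySem.List.pyGet? (aIndices s) (-2) = some a := by
      simp [PySem.List.pyGet?, hidx2, ha]
    have hlast : (aIndices s).getLast? = some b := by
      rw [List.getLast?_eq_getElem?]; exact hb
    have hdrop : (aIndices s).dropLast.getLast? = some a := by
      rw [List.getLast?_eq_getElem?, List.length_dropLast, List.getElem?_dropLast,
        if_pos (by omega), show (aIndices s).length - 1 - 1 = (aIndices s).length - 2 by omega]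
      exact ha
    simp only [hget1, hget2]
    unfold lastTwo
    rw [hlast, hdrop]
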